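-- pv_equiv track=rewrite | github.com/erickv94/scriptingCautaDev | update_orders/update_order.py | cleaned_last_profiles
-- ===== SOURCE A (Python) =====
-- def cleaned_last_profiles(client_list):
--     profiles_cleaned = {}
--     profiles_cleaned_list = []
--
--     for client in client_list:
--         profiles_cleaned[client['profile_id']] = client
--
--     for key in profiles_cleaned.keys():
--         profiles_cleaned_list.append(profiles_cleaned[key])
--
--     return profiles_cleaned_list
-- ===== SOURCE B (Python) =====
-- def cleaned_last_profiles(client_list):
--     result = []
--     index_of = {}
--     for client in client_list:
--         pid = client['profile_id']
--         if pid in index_of: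
--             result[index_of[pid]] = client
--         else:
--             index_of[pid] = len(result)
--             result.append(client)
--     return result
-- ===== Notes on version B (the rewrite author's own statement) =====
-- stated objective: alternative
-- what changed: Replaces A's two loops (build a profile_id->client dict, then a second loop extracting its values) with a single fused pass that keeps the result list directly and a profile_id->index map, overwriting result[index] in place on a repeated id.
import Mathlib
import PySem

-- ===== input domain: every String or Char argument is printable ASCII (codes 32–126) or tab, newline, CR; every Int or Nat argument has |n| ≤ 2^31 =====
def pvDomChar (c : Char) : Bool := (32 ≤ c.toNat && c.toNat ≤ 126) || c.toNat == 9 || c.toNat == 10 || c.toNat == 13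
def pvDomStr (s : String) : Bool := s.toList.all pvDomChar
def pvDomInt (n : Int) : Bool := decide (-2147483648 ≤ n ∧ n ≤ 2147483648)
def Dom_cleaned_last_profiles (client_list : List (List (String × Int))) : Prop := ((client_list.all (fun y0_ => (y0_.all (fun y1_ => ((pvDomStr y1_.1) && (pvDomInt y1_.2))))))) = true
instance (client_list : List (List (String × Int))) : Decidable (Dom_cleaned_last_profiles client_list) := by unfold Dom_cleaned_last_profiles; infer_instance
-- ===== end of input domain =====

-- B fuses A's two loops (dict of clients + values-extraction loop) into one pass over
-- client_list keeping the result list directly plus a profile_id -> index map, overwriting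
-- result[index] in place on a repeated profile_id; alternative decomposition, same cost.


-- client['profile_id']; Pre_ guarantees the lookup succeeds, so the .getD 0 default is never used
def pvProfileId (client : List (String × Int)) : Int :=
  ((PySem.Dict.mk client).get? "profile_id").getD 0

-- ===== PORT A =====
def cleaned_last_profiles (client_list : List (List (String × Int))) : List (List (String × Int)) :=
  let profiles_cleaned : PySem.Dict Int (List (String × Int)) :=
    client_list.foldl (fun d client => d.insert (pvProfileId client) client) PySem.Dict.empty
  profiles_cleaned.keys.foldl
    (fun profiles_cleaned_list key => profiles_cleaned_list ++ [profiles_cleaned.getD key []]) []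

-- ===== PORT B =====
-- one step of B's single loop: overwrite result[index_of[pid]] in place, or append and record the index
def pvStepB (st : List (List (String × Int)) × PySem.Dict Int Nat) (client : List (String × Int)) :
    List (List (String × Int)) × PySem.Dict Int Nat :=
  let pid := pvProfileId client
  match st.2.get? pid with
  | some i => (st.1.set i client, st.2)
  | none   => (st.1 ++ [client], st.2.insert pid st.1.length)

def cleaned_last_profiles_alt (client_list : List (List (String × Int))) : List (List (String × Int)) :=
  (client_list.foldl pvStepB ([], PySem.Dict.empty)).1

-- ===== PRECONDITION & SPEC =====
-- A (and B) raise KeyError when a client lacks the 'profile_id' key; Pre_ requires it present.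
def Pre_cleaned_last_profiles (client_list : List (List (String × Int))) : Prop :=
  ∀ client ∈ client_list, ((PySem.Dict.mk client).get? "profile_id").isSome = true
instance (client_list : List (List (String × Int))) : Decidable (Pre_cleaned_last_profiles client_list) := by unfold Pre_cleaned_last_profiles; infer_instance

def pvWitness_cleaned_last_profiles : (List (List (String × Int))) :=
  ([[("profile_id", 1), ("order", 7)], [("profile_id", 1), ("order", 9)], [("profile_id", 2)]])

def Spec_cleaned_last_profiles (client_list : List (List (String × Int))) (out : List (List (String × Int))) : Prop := out = cleaned_last_profiles_alt client_list
instance (client_list : List (List (String × Int))) (out : List (List (String × Int))) : Decidable (Spec_cleaned_last_profiles client_list out) := by unfold Spec_cleaned_last_profiles; infer_instance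

-- ===== CLAIM (what is proved, stated in full; the proofs are below) =====
def Claim_equal_cleaned_last_profiles : Prop := ∀ (client_list : List (List (String × Int))), Dom_cleaned_last_profiles client_list → Pre_cleaned_last_profiles client_list → Spec_cleaned_last_profiles client_list (cleaned_last_profiles client_list)

-- ===== LEMMAS AND PROOFS =====

-- replacing the (unique) pair whose key is k rewrites the values list at k's index
theorem pv_map_if_eq_set {κ : Type} [BEq κ] [LawfulBEq κ] [DecidableEq κ] (items : List (κ × List (String × Int)))
    (k : κ) (v : List (String × Int)) (i : Nat)
    (hnd : (items.map (·.1)).Nodup) (hidx : (items.map (·.1)).idxOf? k = some i) :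
    (items.map (fun p => if p.1 == k then (k, v) else p)).map (·.2) = (items.map (·.2)).set i v := by
  induction items generalizing i with
  | nil => simp at hidx
  | cons p ps ih =>
    simp only [List.map_cons, List.idxOf?_cons] at hidx hnd ⊢
    by_cases h : p.1 = k
    · simp only [h, BEq.rfl, if_pos] at hidx ⊢
      simp only [Option.some.injEq] at hidx
      subst hidx
      simp only [List.set_cons_zero, List.cons.injEq, true_and]
      rw [List.nodup_cons] at hnd
      have hk : k ∉ ps.map (·.1) := by simpa [h] using hnd.1
      have : ∀ q ∈ ps, (if q.1 == k then (k, v) else q) = q := by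
        intro q hq
        have : q.1 ≠ k := fun hq1 => hk (hq1 ▸ List.mem_map_of_mem hq)
        simp [this]
      rw [List.map_congr_left this, List.map_id']
    · have hne : (p.1 == k) = false := by simp [h]
      simp only [hne, Bool.false_eq_true, if_false] at hidx ⊢
      cases hj : (ps.map (·.1)).idxOf? k with
      | none => simp [hj] at hidx
      | some j =>
        simp only [hj, Option.map_some, Option.some.injEq] at hidx
        subst hidx
        rw [List.nodup_cons] at hnd
        simp only [List.set_cons_succ, List.cons.injEq, true_and]
        exact ih j hnd.2 hj

theorem pv_idxOf?_append_singleton {κ : Type} [BEq κ] [LawfulBEq κ] [DecidableEq κ] (l : List κ)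
    (a b : κ) (h : a ∉ l) : (l ++ [a]).idxOf? b = if b = a then some l.length else l.idxOf? b := by
  induction l with
  | nil =>
    simp only [List.nil_append, List.idxOf?_cons, List.idxOf?_nil]
    by_cases hb : b = a
    · simp [hb]
    · simp [hb, Ne.symm hb]
  | cons x xs ih =>
    have hx : a ∉ xs := fun hm => h (List.mem_cons_of_mem _ hm)
    simp only [List.cons_append, List.idxOf?_cons]
    by_cases hxb : x = b
    · have hba : ¬ b = a := by
        intro e; exact h (by simp [hxb, e])
      rw [if_neg hba]
      simp [hxb]
    · have hne : (x == b) = false := by simp [hxb]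
      simp only [hne, Bool.false_eq_true, if_false]
      rw [ih hx]
      by_cases hba : b = a
      · simp [hba]
      · simp [hba]

-- the fused loop of B, started in a state matching dict d, computes the values of A's dict loop
theorem pv_stepB_fold (l : List (List (String × Int))) (d : PySem.Dict Int (List (String × Int)))
    (res : List (List (String × Int))) (m : PySem.Dict Int Nat)
    (hnd : d.keys.Nodup) (hres : res = d.values)
    (hm : ∀ k : Int, m.get? k = d.keys.idxOf? k) :
    (l.foldl pvStepB (res, m)).1
      = (l.foldl (fun d c => d.insert (pvProfileId c) c) d).values := by
  induction l generalizing d res m with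
  | nil => simpa using hres
  | cons c cs ih =>
    simp only [List.foldl_cons]
    cases hg : m.get? (pvProfileId c) with
    | some i =>
      have hidx : d.keys.idxOf? (pvProfileId c) = some i := (hm _).symm.trans hg
      have hmem : pvProfileId c ∈ d.keys := by
        by_contra hn
        simp [List.idxOf?_eq_none_iff.mpr hn] at hidx
      have hcont : d.contains (pvProfileId c) = true := by
        rw [PySem.Dict.contains_eq_decide_mem_keys]; simp [hmem]
      have hkeys : (d.insert (pvProfileId c) c).keys = d.keys :=
        PySem.Dict.keys_insert_of_contains d c hcont
      have hvals : (d.insert (pvProfileId c) c).values = d.values.set i c := by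
        have hit := PySem.Dict.items_insert_of_contains (d := d) (v := c) hcont
        have : (d.insert (pvProfileId c) c).values
            = ((d.insert (pvProfileId c) c).items).map (·.2) := rfl
        rw [this, hit]
        exact pv_map_if_eq_set d.items (pvProfileId c) c i hnd hidx
      have hstep : pvStepB (res, m) c = (res.set i c, m) := by
        simp [pvStepB, hg]
      rw [hstep, ih (d.insert (pvProfileId c) c) _ _ (hkeys ▸ hnd)
        (by rw [hvals, hres]) (fun k => (hm k).trans (by rw [hkeys]))]
    | none =>
      have hidx : d.keys.idxOf? (pvProfileId c) = none := (hm _).symm.trans hg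
      have hmem : pvProfileId c ∉ d.keys := List.idxOf?_eq_none_iff.mp hidx
      have hcont : d.contains (pvProfileId c) = false := by
        rw [PySem.Dict.contains_eq_decide_mem_keys]; simp [hmem]
      have hit := PySem.Dict.items_insert_of_not_contains (d := d) (v := c) hcont
      have hkeys : (d.insert (pvProfileId c) c).keys = d.keys ++ [pvProfileId c] := by
        show ((d.insert (pvProfileId c) c).items).map (·.1) = _
        rw [hit]; simp [PySem.Dict.keys]
      have hvals : (d.insert (pvProfileId c) c).values = d.values ++ [c] := by
        show ((d.insert (pvProfileId c) c).items).map (·.2) = _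
        rw [hit]; simp [PySem.Dict.values]
      have hlen : res.length = d.keys.length := by
        rw [hres]; simp [PySem.Dict.values, PySem.Dict.keys]
      have hstep : pvStepB (res, m) c = (res ++ [c], m.insert (pvProfileId c) res.length) := by
        simp [pvStepB, hg]
      have hnd' : (d.insert (pvProfileId c) c).keys.Nodup := by
        rw [hkeys]
        exact List.Nodup.append hnd (List.nodup_singleton _) (by simpa using hmem)
      rw [hstep, ih (d.insert (pvProfileId c) c) _ _ hnd' (by rw [hvals, hres])]
      intro k
      rw [PySem.Dict.get?_insert, hkeys,
        pv_idxOf?_append_singleton d.keys (pvProfileId c) k hmem]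
      by_cases hk : k = pvProfileId c <;> simp [hk, hm k, hlen]

-- ===== VERDICT (by name: the statement is the Claim_ definition above) =====
theorem cleaned_last_profiles_spec : Claim_equal_cleaned_last_profiles := by
  intro client_list _ _
  unfold Spec_cleaned_last_profiles cleaned_last_profiles cleaned_last_profiles_alt
  set d := client_list.foldl (fun d client => d.insert (pvProfileId client) client)
    (PySem.Dict.empty : PySem.Dict Int (List (String × Int))) with hd
  have hnd : d.keys.Nodup := by
    rw [hd]
    exact PySem.Dict.nodup_keys_foldl_insert_key client_list pvProfileId
      (fun _ c => c) PySem.Dict.empty PySem.Dict.nodup_keys_empty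
  rw [PySem.List.foldl_append_singleton_eq_map,
    ← PySem.Dict.values_eq_map_keys d hnd [],
    pv_stepB_fold client_list PySem.Dict.empty [] PySem.Dict.empty
      PySem.Dict.nodup_keys_empty rfl (by intro k; simp [PySem.Dict.get?_empty])]
  simp [hd]
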